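-- pv_equiv track=rewrite | github.com/ZhanXiang136/APCSP-Create-Task | main.py | check_digit
-- ===== SOURCE A (Python) =====
-- def check_digit(input_string, first_range, last_range):
--     list_of_options = []
--     for numbers in range(first_range, last_range + 1):  # add all possible options in list
--         list_of_options.append(numbers)
--     if (input_string.isdigit()):  # check if string is digit
--         for number in list_of_options:  # check if string is in the list of options
--             if (number == int(input_string)):
--                 return True
--     else:
--         return False
-- ===== SOURCE B (Python) =====
-- def check_digit(input_string, first_range, last_range):
--     if not input_string.isdigit():
--         return False
--     if first_range <= int(input_string) <= last_range:
--         return True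
--     # fall through (None) when the digit string is out of range, like A
-- ===== Notes on version B (the rewrite author's own statement) =====
-- stated objective: faster
-- what changed: Replaced the materialised range list and the linear membership scan with a direct O(1) bounds comparison first_range <= int(s) <= last_range, keeping the None fallthrough for out-of-range digit strings.
import Mathlib
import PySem

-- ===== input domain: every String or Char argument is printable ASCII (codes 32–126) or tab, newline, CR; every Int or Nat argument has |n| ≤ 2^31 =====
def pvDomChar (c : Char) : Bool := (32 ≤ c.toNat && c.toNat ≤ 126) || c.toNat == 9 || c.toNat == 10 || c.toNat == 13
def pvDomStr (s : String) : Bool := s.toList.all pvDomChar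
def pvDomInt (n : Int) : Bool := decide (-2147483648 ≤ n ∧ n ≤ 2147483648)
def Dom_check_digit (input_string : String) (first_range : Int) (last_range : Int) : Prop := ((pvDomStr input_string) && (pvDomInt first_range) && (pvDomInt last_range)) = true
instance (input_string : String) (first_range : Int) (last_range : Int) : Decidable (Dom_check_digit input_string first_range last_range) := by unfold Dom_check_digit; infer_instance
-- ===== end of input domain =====

-- ===== PORT A =====
-- B replaces A's range-list build + linear scan by a direct O(1) bounds check (same values, incl. the None fallthrough).
-- loop over list_of_options: return True on the first match, fall through (None) otherwise
def pvLoopA (n : Int) : List Int → Option Bool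
  | [] => none
  | x :: xs => if x = n then some true else pvLoopA n xs

def check_digit (input_string : String) (first_range : Int) (last_range : Int) : Option Bool :=
  let list_of_options := PySem.List.pyRange first_range (last_range + 1) 1
  if PySem.Str.strIsdigit input_string then
    match PySem.Int.ofStr? input_string with
    | some n => pvLoopA n list_of_options
    | none => none   -- unreachable on Dom: an ASCII all-digit string always parses
  else some false

-- ===== PORT B =====
def check_digit_alt (input_string : String) (first_range : Int) (last_range : Int) : Option Bool :=
  if !PySem.Str.strIsdigit input_string then some false
  else match PySem.Int.ofStr? input_string with
    | some n => if first_range ≤ n ∧ n ≤ last_range then some true else none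
    | none => none

-- ===== PRECONDITION & SPEC =====
def Spec_check_digit (input_string : String) (first_range : Int) (last_range : Int) (out : Option Bool) : Prop := out = check_digit_alt input_string first_range last_range
instance (input_string : String) (first_range : Int) (last_range : Int) (out : Option Bool) : Decidable (Spec_check_digit input_string first_range last_range out) := by unfold Spec_check_digit; infer_instance

-- ===== CLAIM (what is proved, stated in full; the proofs are below) =====
def Claim_equal_check_digit : Prop := ∀ (input_string : String) (first_range : Int) (last_range : Int), Dom_check_digit input_string first_range last_range → Spec_check_digit input_string first_range last_range (check_digit input_string first_range last_range)

-- ===== LEMMAS AND PROOFS =====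

-- ===== VERDICT (by name: the statement is the Claim_ definition above) =====
theorem pvLoopA_eq_mem (n : Int) (l : List Int) :
    pvLoopA n l = if n ∈ l then some true else none := by
  induction l with
  | nil => simp [pvLoopA]
  | cons x xs ih =>
    simp only [pvLoopA, List.mem_cons, ih]
    by_cases h : x = n
    · simp [h]
    · have hne : ¬ n = x := fun hh => h hh.symm
      rw [if_neg h]
      by_cases hm : n ∈ xs
      · rw [if_pos hm, if_pos (Or.inr hm)]
      · rw [if_neg hm, if_neg (by tauto)]

theorem check_digit_spec : Claim_equal_check_digit := by
  intro s a b _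
  unfold Spec_check_digit check_digit check_digit_alt
  cases hd : PySem.Str.strIsdigit s with
  | false => simp [hd]
  | true =>
    simp only [hd, Bool.not_true, if_true, Bool.false_eq_true, if_false]
    cases h : PySem.Int.ofStr? s with
    | none => rfl
    | some n =>
      simp only [pvLoopA_eq_mem, PySem.List.mem_pyRange_one]
      by_cases hn : a ≤ n ∧ n ≤ b
      · rw [if_pos (by omega), if_pos hn]
      · rw [if_neg (by omega), if_neg hn]
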